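-- pv_equiv track=rewrite | github.com/trippixn963/AzabBot | src/services/alt_detection.py | _check_punishment_correlation
-- ===== SOURCE A (Python) =====
-- from typing import TYPE_CHECKING, Optional, List, Dict, Tuple
--
-- SECONDS_24_HOURS = 86400
--
-- class SignalWeights:
--     """Point values for each detection signal."""
--
--     # Account age signals
--     ACCOUNT_AGE_UNDER_7_DAYS = 30
--     ACCOUNT_AGE_UNDER_30_DAYS = 15
--     ACCOUNT_AGE_UNDER_90_DAYS = 5
--
--     # Username similarity (0-100% match scaled)
--     USERNAME_EXACT_MATCH = 50
--     USERNAME_HIGH_SIMILARITY = 35  # > 80% similar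
--     USERNAME_MEDIUM_SIMILARITY = 20  # > 60% similar
--
--     # Join timing
--     JOINED_WITHIN_1_HOUR = 40
--     JOINED_WITHIN_6_HOURS = 25
--     JOINED_WITHIN_24_HOURS = 15
--     JOINED_WITHIN_7_DAYS = 5
--
--     # Same inviter
--     SAME_INVITER = 35
--
--     # Avatar match
--     SAME_AVATAR = 45
--
--     # Nickname overlap
--     NICKNAME_OVERLAP = 25
--
--     # High join count (rejoiner behavior)
--     JOIN_COUNT_3_PLUS = 20
--     JOIN_COUNT_5_PLUS = 35
--
--     # Account creation proximity
--     CREATED_WITHIN_1_HOUR = 45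
--     CREATED_WITHIN_24_HOURS = 30
--     CREATED_WITHIN_7_DAYS = 15
--
--     # Bio/status match
--     SAME_BIO = 40
--     SIMILAR_BIO = 20  # > 70% similar
--
--     # Punishment history
--     BOTH_PREVIOUSLY_PUNISHED = 25
--     BOTH_PUNISHED_SAME_DAY = 40
--
--     # Enhanced signals
--     WRITING_STYLE_MATCH = 35  # Similar message patterns
--     ACTIVITY_TIME_CORRELATION = 40  # Active at same hours
--     MUTUAL_AVOIDANCE = 45  # Never interact with each other despite being active
--
-- def _check_punishment_correlation(
--
--     banned_data: Dict,
--     candidate_data: Dict,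
-- ) -> Tuple[int, str]:
--     """Check if both accounts have correlated punishment history."""
--     banned_dates = banned_data.get('punishment_dates', [])
--     candidate_dates = candidate_data.get('punishment_dates', [])
--
--     if not banned_dates or not candidate_dates:
--         return 0, ""
--
--     # Check if punished on same day
--     for b_date in banned_dates:
--         for c_date in candidate_dates:
--             # Compare timestamps (within 24 hours = same day punishment)
--             if abs(b_date - c_date) <= SECONDS_24_HOURS:
--                 return SignalWeights.BOTH_PUNISHED_SAME_DAY, "Both punished within 24 hours of each other"
--
--     # Both have punishment history
--     return SignalWeights.BOTH_PREVIOUSLY_PUNISHED, "Both have previous punishments"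
-- ===== SOURCE B (Python) =====
-- SECONDS_24_HOURS = 86400
--
-- def _check_punishment_correlation(banned_data, candidate_data):
--     banned_dates = banned_data.get('punishment_dates', [])
--     candidate_dates = candidate_data.get('punishment_dates', [])
--     if not banned_dates or not candidate_dates:
--         return 0, ""
--     xs = sorted(banned_dates)
--     ys = sorted(candidate_dates)
--     i = 0
--     j = 0
--     while i < len(xs) and j < len(ys):
--         if abs(xs[i] - ys[j]) <= SECONDS_24_HOURS:
--             return 40, "Both punished within 24 hours of each other"
--         if xs[i] < ys[j]:
--             i += 1
--         else:
--             j += 1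
--     return 25, "Both have previous punishments"
-- ===== Notes on version B (the rewrite author's own statement) =====
-- stated objective: alternative
-- what changed: Replaced the nested all-pairs scan with sort-both-lists and a two-pointer merge that detects a pair of timestamps within 24 hours.
import Mathlib
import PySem

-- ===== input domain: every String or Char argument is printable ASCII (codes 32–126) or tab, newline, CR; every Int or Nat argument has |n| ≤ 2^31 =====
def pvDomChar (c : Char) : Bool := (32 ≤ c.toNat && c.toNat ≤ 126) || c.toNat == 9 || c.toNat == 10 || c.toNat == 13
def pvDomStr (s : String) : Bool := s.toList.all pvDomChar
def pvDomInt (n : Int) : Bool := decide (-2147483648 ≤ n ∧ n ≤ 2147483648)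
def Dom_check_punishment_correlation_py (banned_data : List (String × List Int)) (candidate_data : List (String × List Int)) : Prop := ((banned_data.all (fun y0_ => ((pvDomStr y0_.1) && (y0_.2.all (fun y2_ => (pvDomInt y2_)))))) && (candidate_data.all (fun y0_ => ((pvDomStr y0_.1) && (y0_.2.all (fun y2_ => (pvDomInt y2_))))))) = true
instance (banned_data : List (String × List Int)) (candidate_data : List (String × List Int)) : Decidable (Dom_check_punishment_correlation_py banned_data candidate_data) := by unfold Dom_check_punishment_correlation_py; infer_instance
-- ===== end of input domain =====

-- B replaces A's nested all-pairs scan with a sort + two-pointer merge (a different algorithm, same return value; not measured faster on random inputs since A early-exits).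

-- ===== PORT A =====
-- inner 'for c_date in candidate_dates' loop: true as soon as |b - c| ≤ 86400
def pvInnerA (b : Int) : List Int → Bool
  | [] => false
  | c :: cs => if |b - c| ≤ (86400 : Int) then true else pvInnerA b cs

-- outer 'for b_date in banned_dates' loop
def pvOuterA : List Int → List Int → Bool
  | [], _ => false
  | b :: bs, cs => if pvInnerA b cs then true else pvOuterA bs cs

def check_punishment_correlation_py (banned_data : List (String × List Int)) (candidate_data : List (String × List Int)) : Int × String :=
  let banned_dates := PySem.Dict.getD (PySem.Dict.mk banned_data) "punishment_dates" ([] : List Int)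
  let candidate_dates := PySem.Dict.getD (PySem.Dict.mk candidate_data) "punishment_dates" ([] : List Int)
  if banned_dates = [] ∨ candidate_dates = [] then (0, "")
  else if pvOuterA banned_dates candidate_dates then
    (40, "Both punished within 24 hours of each other")
  else (25, "Both have previous punishments")

-- ===== PORT B =====
-- the 'while i < len(xs) and j < len(ys)' two-pointer loop of Source B
def pvTwoPtr : List Int → List Int → Bool
  | [], _ => false
  | _ :: _, [] => false
  | x :: xs, y :: ys =>
    if |x - y| ≤ (86400 : Int) then true
    else if x < y then pvTwoPtr xs (y :: ys)
    else pvTwoPtr (x :: xs) ys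
termination_by xs ys => xs.length + ys.length

def check_punishment_correlation_py_alt (banned_data : List (String × List Int)) (candidate_data : List (String × List Int)) : Int × String :=
  let banned_dates := PySem.Dict.getD (PySem.Dict.mk banned_data) "punishment_dates" ([] : List Int)
  let candidate_dates := PySem.Dict.getD (PySem.Dict.mk candidate_data) "punishment_dates" ([] : List Int)
  if banned_dates = [] ∨ candidate_dates = [] then (0, "")
  else if pvTwoPtr (PySem.List.sorted banned_dates (fun x => x) false)
                   (PySem.List.sorted candidate_dates (fun x => x) false) then
    (40, "Both punished within 24 hours of each other")
  else (25, "Both have previous punishments")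

-- ===== PRECONDITION & SPEC =====
def Spec_check_punishment_correlation_py (banned_data : List (String × List Int)) (candidate_data : List (String × List Int)) (out : Int × String) : Prop := out = check_punishment_correlation_py_alt banned_data candidate_data
instance (banned_data : List (String × List Int)) (candidate_data : List (String × List Int)) (out : Int × String) : Decidable (Spec_check_punishment_correlation_py banned_data candidate_data out) := by unfold Spec_check_punishment_correlation_py; infer_instance

-- ===== CLAIM (what is proved, stated in full; the proofs are below) =====
def Claim_equal_check_punishment_correlation_py : Prop := ∀ (banned_data : List (String × List Int)) (candidate_data : List (String × List Int)), Dom_check_punishment_correlation_py banned_data candidate_data → Spec_check_punishment_correlation_py banned_data candidate_data (check_punishment_correlation_py banned_data candidate_data)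

-- ===== LEMMAS AND PROOFS =====

theorem pvInnerA_iff (b : Int) (cs : List Int) :
    pvInnerA b cs = true ↔ ∃ c ∈ cs, |b - c| ≤ (86400 : Int) := by
  induction cs with
  | nil => simp [pvInnerA]
  | cons c cs ih =>
    simp only [pvInnerA]
    split_ifs with h
    · simp [h]
    · simp [ih, h]

theorem pvOuterA_iff (bs cs : List Int) :
    pvOuterA bs cs = true ↔ ∃ b ∈ bs, ∃ c ∈ cs, |b - c| ≤ (86400 : Int) := by
  induction bs with
  | nil => simp [pvOuterA]
  | cons b bs ih =>
    simp only [pvOuterA]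
    split_ifs with h
    · simp only [true_iff]
      obtain ⟨c, hc, hw⟩ := (pvInnerA_iff b cs).mp h
      exact ⟨b, by simp, c, hc, hw⟩
    · rw [Bool.eq_iff_iff] at h
      simp only [pvInnerA_iff, iff_true] at h
      simp only [ih, List.mem_cons]
      constructor
      · rintro ⟨b', hb', w⟩; exact ⟨b', Or.inr hb', w⟩
      · rintro ⟨b', rfl | hb', w⟩
        · exact absurd w h
        · exact ⟨b', hb', w⟩

theorem pvTwoPtr_iff (xs ys : List Int)
    (hx : xs.Pairwise (· ≤ ·)) (hy : ys.Pairwise (· ≤ ·)) :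
    pvTwoPtr xs ys = true ↔ ∃ x ∈ xs, ∃ y ∈ ys, |x - y| ≤ (86400 : Int) := by
  fun_induction pvTwoPtr xs ys with
  | case1 ys => simp
  | case2 x xs => simp
  | case3 x xs y ys h => simp [h]
  | case4 x xs y ys h hlt ih =>
    rw [ih hx.of_cons hy]
    constructor
    · rintro ⟨x', hx', hw⟩; exact ⟨x', List.mem_cons_of_mem _ hx', hw⟩
    · rintro ⟨x', hx', y', hy', hw⟩
      rcases List.mem_cons.mp hx' with rfl | hx'
      · -- head x: every y' in y :: ys has y ≤ y', and y - x > 86400, contradiction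
        exfalso
        have hle : y ≤ y' := by
          rcases List.mem_cons.mp hy' with rfl | hy''
          · exact le_refl _
          · exact List.rel_of_pairwise_cons hy hy''
        have : ¬ |x' - y| ≤ (86400 : Int) := by simpa using h
        rw [abs_le] at hw this
        omega
      · exact ⟨x', hx', y', hy', hw⟩
  | case5 x xs y ys h hlt ih =>
    rw [ih hx hy.of_cons]
    constructor
    · rintro ⟨x', hx', y', hy', hw⟩; exact ⟨x', hx', y', List.mem_cons_of_mem _ hy', hw⟩
    · rintro ⟨x', hx', y', hy', hw⟩
      rcases List.mem_cons.mp hy' with rfl | hy''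
      · exfalso
        have hle : x ≤ x' := by
          rcases List.mem_cons.mp hx' with rfl | hx''
          · exact le_refl _
          · exact List.rel_of_pairwise_cons hx hx''
        have hgt : ¬ |x - y'| ≤ (86400 : Int) := by simpa using h
        have hge : y' ≤ x := not_lt.mp hlt
        rw [abs_le] at hw hgt
        omega
      · exact ⟨x', hx', y', hy'', hw⟩

theorem pvOuter_eq_twoPtr (bs cs : List Int) :
    pvOuterA bs cs
      = pvTwoPtr (PySem.List.sorted bs (fun x => x) false) (PySem.List.sorted cs (fun x => x) false) := by
  have hx : (PySem.List.sorted bs (fun x => x) false).Pairwise (· ≤ ·) := by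
    simpa using PySem.List.sorted_pairwise (xs := bs) (key := fun x => x)
  have hy : (PySem.List.sorted cs (fun x => x) false).Pairwise (· ≤ ·) := by
    simpa using PySem.List.sorted_pairwise (xs := cs) (key := fun x => x)
  rw [Bool.eq_iff_iff, pvOuterA_iff, pvTwoPtr_iff _ _ hx hy]
  simp only [PySem.List.mem_sorted]

-- ===== VERDICT (by name: the statement is the Claim_ definition above) =====
theorem check_punishment_correlation_py_spec : Claim_equal_check_punishment_correlation_py := by
  intro bd cd _
  unfold Spec_check_punishment_correlation_py
  unfold check_punishment_correlation_py check_punishment_correlation_py_alt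
  simp only [pvOuter_eq_twoPtr]
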